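-- pv_equiv track=rewrite | github.com/jcdiazvelez/ptracing-CosmicRay-analysis | src/data_methods.py | bin_particles
-- ===== SOURCE A (Python) =====
-- def bin_particles(pixels, binning):
--     num_bins = len(binning) - 1
--     pixels_binned = []
--     for particles_list in pixels:
--         particles_binned = [[] for i in range(num_bins)]
--         for particle in particles_list:
--             for i in range(num_bins):
--                 if binning[i] < particle[0] < binning[i + 1]:
--                     particles_binned[i].append(particle)
--                     break
--         pixels_binned.append(particles_binned)
--     return pixels_binned
-- ===== SOURCE B (Python) =====
-- # B: transposed traversal — instead of scanning all bins for each particle (first match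
-- # wins), walk the bin edges once and partition the still-unassigned particles per bin.
-- def bin_particles(pixels, binning):
--     edges = list(zip(binning, binning[1:]))
--     pixels_out = []
--     for plist in pixels:
--         bins = []
--         remaining = plist
--         for lo, hi in edges:
--             hit, rest = [], []
--             for p in remaining:
--                 if lo < p[0] < hi:
--                     hit.append(p)
--                 else:
--                     rest.append(p)
--             bins.append(hit)
--             remaining = rest
--         pixels_out.append(bins)
--     return pixels_out
-- ===== Notes on version B (the rewrite author's own statement) =====
-- stated objective: alternative
-- what changed: A scans all bins per particle with first-match break into a mutable bin table; B transposes the loops: it walks the (lo,hi) edge pairs once and at each bin partitions the still-unassigned particles into that bin and a remainder, so no bin table or break is needed.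
import Mathlib
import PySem

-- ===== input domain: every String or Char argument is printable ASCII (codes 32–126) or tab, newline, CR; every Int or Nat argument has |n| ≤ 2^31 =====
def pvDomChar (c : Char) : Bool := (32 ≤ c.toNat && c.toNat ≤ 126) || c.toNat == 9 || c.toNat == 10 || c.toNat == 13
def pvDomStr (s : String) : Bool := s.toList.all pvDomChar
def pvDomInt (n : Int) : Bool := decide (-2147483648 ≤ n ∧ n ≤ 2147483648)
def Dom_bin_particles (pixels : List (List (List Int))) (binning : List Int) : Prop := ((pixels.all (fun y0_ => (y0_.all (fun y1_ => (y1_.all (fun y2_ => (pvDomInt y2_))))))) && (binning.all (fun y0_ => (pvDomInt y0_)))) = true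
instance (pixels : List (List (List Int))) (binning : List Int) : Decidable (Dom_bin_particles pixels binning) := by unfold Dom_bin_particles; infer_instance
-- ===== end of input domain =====

-- B transposes A's loops: A scans all bins per particle (first match wins) into a mutable
-- bin table; B walks the (lo,hi) edge pairs once, partitioning the still-unassigned
-- particles per bin. Same cost class; structurally different ('alternative').

-- ===== PORT A =====
-- inner 'for i in range(num_bins): if binning[i] < particle[0] < binning[i+1]: …append; break'
def pvAScan (binning : List Int) (particle : List Int) :
    List (List (List Int)) → List Int → List (List (List Int))
  | bins, [] => bins
  | bins, i :: rest =>
    if PySem.List.pyGetD binning i 0 < PySem.List.pyGetD particle 0 0 ∧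
       PySem.List.pyGetD particle 0 0 < PySem.List.pyGetD binning (i + 1) 0 then
      bins.modify i.toNat (· ++ [particle])
    else pvAScan binning particle bins rest

def bin_particles (pixels : List (List (List Int))) (binning : List Int) :
    List (List (List (List Int))) :=
  let numBins : Int := (binning.length : Int) - 1
  pixels.foldl (fun acc plist =>
    acc ++ [plist.foldl
      (fun bins particle => pvAScan binning particle bins (PySem.List.pyRange 0 numBins 1))
      ((PySem.List.pyRange 0 numBins 1).map (fun _ => ([] : List (List Int))))]) []

-- ===== PORT B =====
-- inner 'for lo, hi in edges: partition remaining into hit/rest; bins.append(hit)' from Source B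
def pvBStep (st : List (List (List Int)) × List (List Int)) (e : Int × Int) :
    List (List (List Int)) × List (List Int) :=
  let split := st.2.foldl (fun hr p =>
    if e.1 < PySem.List.pyGetD p 0 0 ∧ PySem.List.pyGetD p 0 0 < e.2 then
      (hr.1 ++ [p], hr.2)
    else (hr.1, hr.2 ++ [p])) ([], [])
  (st.1 ++ [split.1], split.2)

def bin_particles_alt (pixels : List (List (List Int))) (binning : List Int) :
    List (List (List (List Int))) :=
  let edges := binning.zip (binning.drop 1)
  pixels.foldl (fun out plist => out ++ [(edges.foldl pvBStep ([], plist)).1]) []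

-- ===== PRECONDITION & SPEC =====
-- Pre_ excludes exactly the inputs where Python A raises IndexError: when there are at
-- least two bin edges, the condition 'binning[i] < particle[0]' is evaluated, so an
-- empty particle list makes particle[0] raise (B raises identically there).
def Pre_bin_particles (pixels : List (List (List Int))) (binning : List Int) : Prop :=
  2 ≤ binning.length → ∀ plist ∈ pixels, ∀ p ∈ plist, p ≠ []
instance (pixels : List (List (List Int))) (binning : List Int) : Decidable (Pre_bin_particles pixels binning) := by unfold Pre_bin_particles; infer_instance

def pvWitness_bin_particles : List (List (List Int)) × List Int :=
  ([[[1], [5]], [[-2], [4]]], [0, 3, 10])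

def Spec_bin_particles (pixels : List (List (List Int))) (binning : List Int) (out : List (List (List (List Int)))) : Prop := out = bin_particles_alt pixels binning
instance (pixels : List (List (List Int))) (binning : List Int) (out : List (List (List (List Int)))) : Decidable (Spec_bin_particles pixels binning out) := by unfold Spec_bin_particles; infer_instance

-- ===== CLAIM (what is proved, stated in full; the proofs are below) =====
def Claim_equal_bin_particles : Prop := ∀ (pixels : List (List (List Int))) (binning : List Int), Dom_bin_particles pixels binning → Pre_bin_particles pixels binning → Spec_bin_particles pixels binning (bin_particles pixels binning)

-- ===== LEMMAS AND PROOFS =====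

-- the shared bin membership test, as a Bool on an edge pair
def pvCond (p : List Int) (q : Int × Int) : Bool :=
  decide (q.1 < PySem.List.pyGetD p 0 0 ∧ PySem.List.pyGetD p 0 0 < q.2)

-- proof-side reference: the per-bin partition written with filters
def pvBBins : List (List Int) → List (Int × Int) → List (List (List Int))
  | _, [] => []
  | remaining, (lo, hi) :: rest =>
    remaining.filter (fun p => decide (lo < PySem.List.pyGetD p 0 0 ∧ PySem.List.pyGetD p 0 0 < hi))
      :: pvBBins
          (remaining.filter (fun p => !decide (lo < PySem.List.pyGetD p 0 0 ∧ PySem.List.pyGetD p 0 0 < hi)))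
          rest

-- the two-accumulator partition fold computes the two filters
theorem pvSplit_eq (lo hi : Int) :
    ∀ (rem h r : List (List Int)),
      rem.foldl (fun hr p =>
          if lo < PySem.List.pyGetD p 0 0 ∧ PySem.List.pyGetD p 0 0 < hi then
            (hr.1 ++ [p], hr.2)
          else (hr.1, hr.2 ++ [p])) (h, r) =
        (h ++ rem.filter (fun p => decide (lo < PySem.List.pyGetD p 0 0 ∧ PySem.List.pyGetD p 0 0 < hi)),
         r ++ rem.filter (fun p => !decide (lo < PySem.List.pyGetD p 0 0 ∧ PySem.List.pyGetD p 0 0 < hi))) := by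
  intro rem
  induction rem with
  | nil => intro h r; simp
  | cons p ps ih =>
    intro h r
    rw [List.foldl_cons]
    by_cases hc : lo < PySem.List.pyGetD p 0 0 ∧ PySem.List.pyGetD p 0 0 < hi
    · rw [if_pos hc, ih]
      simp [List.filter_cons]
      exact hc
    · rw [if_neg hc, ih]
      simp [List.filter_cons]
      intro h2
      by_contra h3
      exact hc ⟨h2, by omega⟩

-- B's fold over the edge list builds exactly the filter-partition bins
theorem pvBFold (edges : List (Int × Int)) :
    ∀ (acc : List (List (List Int))) (rem : List (List Int)),
      (edges.foldl pvBStep (acc, rem)).1 = acc ++ pvBBins rem edges := by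
  induction edges with
  | nil => intro acc rem; simp [pvBBins]
  | cons e rest ih =>
    intro acc rem
    obtain ⟨lo, hi⟩ := e
    rw [List.foldl_cons]
    show (rest.foldl pvBStep (pvBStep (acc, rem) (lo, hi))).1 = _
    rw [show pvBStep (acc, rem) (lo, hi) =
        (acc ++ [rem.filter (fun p => decide (lo < PySem.List.pyGetD p 0 0 ∧ PySem.List.pyGetD p 0 0 < hi))],
         rem.filter (fun p => !decide (lo < PySem.List.pyGetD p 0 0 ∧ PySem.List.pyGetD p 0 0 < hi))) by
      unfold pvBStep
      rw [pvSplit_eq]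
      simp]
    rw [ih, pvBBins, List.append_assoc, List.singleton_append]

-- length of the edge-pair list

theorem pvPairs_length (binning : List Int) :
    (binning.zip (binning.drop 1)).length = binning.length - 1 := by
  rw [List.length_zip, List.length_drop]; omega

-- A's inner scan over range(k, len-1) computed by the first matching edge-pair index
theorem pvAScan_eq (binning particle : List Int) :
    ∀ (qs : List (Int × Int)) (k : Nat) (bins : List (List (List Int))),
      qs = (binning.zip (binning.drop 1)).drop k →
      pvAScan binning particle bins (PySem.List.pyRange (k : Int) ((binning.length : Int) - 1) 1) =
        (match qs.findIdx? (pvCond particle) with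
         | none => bins
         | some j => bins.modify (k + j) (· ++ [particle])) := by
  intro qs
  induction qs with
  | nil =>
    intro k bins hq
    have hlen : (binning.zip (binning.drop 1)).length ≤ k := by
      by_contra h
      rw [List.drop_eq_getElem_cons (by omega)] at hq
      exact (List.cons_ne_nil _ _) hq.symm
    rw [pvPairs_length] at hlen
    rw [PySem.List.pyRange_one_eq_nil (by omega)]
    rfl
  | cons q qs ih =>
    intro k bins hq
    have hk : k < (binning.zip (binning.drop 1)).length := by
      by_contra h
      rw [List.drop_eq_nil_of_le (by omega)] at hq
      exact (List.cons_ne_nil _ _) hq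
    have hklen : k < binning.length - 1 := by rw [pvPairs_length] at hk; omega
    rw [List.drop_eq_getElem_cons hk, List.cons.injEq] at hq
    obtain ⟨hqval, hqs⟩ := hq
    have hq1 : q.1 = binning[k]'(by omega) := by rw [hqval, List.getElem_zip]
    have hq2 : q.2 = binning[k + 1]'(by omega) := by
      rw [hqval, List.getElem_zip]
      simp only [List.getElem_drop]
      congr 1
      omega
    rw [PySem.List.pyRange_one_cons (by omega)]
    show pvAScan binning particle bins (↑k :: PySem.List.pyRange (↑k + 1) _ 1) = _
    rw [pvAScan]
    have hb1 : PySem.List.pyGetD binning (↑k) 0 = binning[k]'(by omega) := by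
      rw [PySem.List.pyGetD_natCast]; exact List.getD_eq_getElem _ _ _
    have hb2 : PySem.List.pyGetD binning (↑k + 1) 0 = binning[k + 1]'(by omega) := by
      have hcast : (↑k + 1 : Int) = ((k + 1 : Nat) : Int) := by omega
      rw [hcast, PySem.List.pyGetD_natCast]; exact List.getD_eq_getElem _ _ _
    rw [hb1, hb2, List.findIdx?_cons]
    by_cases hc : pvCond particle q = true
    · have hc' : binning[k]'(by omega) < PySem.List.pyGetD particle 0 0 ∧
          PySem.List.pyGetD particle 0 0 < binning[k + 1]'(by omega) := by
        have h := of_decide_eq_true hc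
        rwa [hq1, hq2] at h
      rw [if_pos hc', hc, if_pos rfl]
      simp
    · have hcf : pvCond particle q = false := by simpa using hc
      have hc' : ¬ (binning[k]'(by omega) < PySem.List.pyGetD particle 0 0 ∧
          PySem.List.pyGetD particle 0 0 < binning[k + 1]'(by omega)) := by
        intro h
        apply hc
        apply decide_eq_true
        rwa [hq1, hq2]
      rw [if_neg hc', hcf]
      have hcast : ((k : Int) + 1) = ((k + 1 : Nat) : Int) := by push_cast; ring
      rw [hcast, ih (k + 1) bins hqs]
      cases h : List.findIdx? (pvCond particle) qs with
      | none => simp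
      | some j =>
        simp only [Option.map_some, Bool.false_eq_true]
        simp only [reduceIte]
        congr 1
        omega

-- B on a cons: prepend the particle into its first matching bin
theorem pvBBins_cons (p : List Int) :
    ∀ (qs : List (Int × Int)) (ps : List (List Int)),
      pvBBins (p :: ps) qs =
        (match qs.findIdx? (pvCond p) with
         | none => pvBBins ps qs
         | some j => (pvBBins ps qs).modify j (fun b => p :: b)) := by
  intro qs
  induction qs with
  | nil => intro ps; simp [pvBBins]
  | cons q qs ih =>
    intro ps
    obtain ⟨lo, hi⟩ := q
    rw [List.findIdx?_cons]
    by_cases hc : pvCond p (lo, hi) = true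
    · have hc' : decide (lo < PySem.List.pyGetD p 0 0 ∧ PySem.List.pyGetD p 0 0 < hi) = true := hc
      have hc2 : (!decide (lo < PySem.List.pyGetD p 0 0 ∧ PySem.List.pyGetD p 0 0 < hi)) = false := by
        rw [hc']; rfl
      simp only [pvBBins, List.filter_cons, hc', Bool.not_true, Bool.false_eq_true,
        reduceIte, hc, List.modify_cons]
    · have hc' : decide (lo < PySem.List.pyGetD p 0 0 ∧ PySem.List.pyGetD p 0 0 < hi) = false := by
        simpa [pvCond] using hc
      have hcf : pvCond p (lo, hi) = false := by simpa using hc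
      simp only [pvBBins, List.filter_cons, hc', Bool.not_false, hcf, Bool.false_eq_true,
        reduceIte, if_true]
      rw [ih]
      cases h : List.findIdx? (pvCond p) qs with
      | none => simp
      | some j => simp [List.modify]

theorem pvBBins_nil : ∀ (qs : List (Int × Int)),
    pvBBins [] qs = List.replicate qs.length [] := by
  intro qs
  induction qs with
  | nil => rfl
  | cons q qs ih => obtain ⟨lo, hi⟩ := q; simp [pvBBins, ih, List.replicate_succ]

theorem pvBBins_length (ps : List (List Int)) :
    ∀ (qs : List (Int × Int)), (pvBBins ps qs).length = qs.length := by
  intro qs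
  induction qs generalizing ps with
  | nil => rfl
  | cons q qs ih => obtain ⟨lo, hi⟩ := q; simp [pvBBins, ih]

theorem pvZip_modify_append (p : List Int) :
    ∀ (bins ys : List (List (List Int))) (k : Nat), bins.length = ys.length →
      List.zipWith (· ++ ·) (bins.modify k (· ++ [p])) ys =
        List.zipWith (· ++ ·) bins (ys.modify k (fun b => p :: b)) := by
  intro bins
  induction bins with
  | nil => intro ys k h; simp
  | cons b bs ih =>
    intro ys k h
    cases ys with
    | nil => simp at h
    | cons y ys =>
      cases k with
      | zero => simp [List.modify_cons]
      | succ k =>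
        simp only [List.modify_cons, Nat.add_sub_cancel, Nat.succ_ne_zero, reduceIte,
          List.zipWith_cons_cons]
        simp only [List.length_cons, Nat.add_right_cancel_iff] at h
        rw [ih ys k h]

theorem pvZip_nil_right :
    ∀ (bins : List (List (List Int))),
      List.zipWith (· ++ ·) bins (List.replicate bins.length []) = bins := by
  intro bins
  induction bins with
  | nil => rfl
  | cons b bs ih => simp [List.replicate_succ, ih]

theorem pvZip_nil_left :
    ∀ (ys : List (List (List Int))),
      List.zipWith (· ++ ·) (List.replicate ys.length []) ys = ys := by
  intro ys
  induction ys with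
  | nil => rfl
  | cons y ys ih => simp [List.replicate_succ, ih]

theorem pvFold_eq (binning : List Int) :
    ∀ (r : List (List Int)) (bins : List (List (List Int))),
      bins.length = (binning.zip (binning.drop 1)).length →
      r.foldl (fun bins particle =>
          pvAScan binning particle bins (PySem.List.pyRange 0 ((binning.length : Int) - 1) 1)) bins =
        List.zipWith (· ++ ·) bins (pvBBins r (binning.zip (binning.drop 1))) := by
  intro r
  induction r with
  | nil =>
    intro bins h
    rw [pvBBins_nil, ← h]
    exact (pvZip_nil_right bins).symm
  | cons p ps ih =>
    intro bins h
    rw [List.foldl_cons]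
    have hstep := pvAScan_eq binning p (binning.zip (binning.drop 1)) 0 bins (by simp)
    simp only [Nat.cast_zero] at hstep
    rw [hstep, pvBBins_cons]
    cases hf : List.findIdx? (pvCond p) (binning.zip (binning.drop 1)) with
    | none => exact ih bins h
    | some j =>
      simp only [Nat.zero_add]
      rw [ih _ (by rw [List.length_modify]; exact h)]
      exact pvZip_modify_append p bins _ j (by rw [pvBBins_length]; exact h)

-- outer loops agree once the per-pixel bodies agree
theorem pvOuter {X Y : Type} (f g : X → Y) (h : ∀ x, f x = g x) :
    ∀ (l : List X) (acc : List Y),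
      l.foldl (fun a x => a ++ [f x]) acc = l.foldl (fun a x => a ++ [g x]) acc := by
  intro l
  induction l with
  | nil => intro acc; rfl
  | cons x xs ih => intro acc; rw [List.foldl_cons, List.foldl_cons, h x, ih]

-- ===== VERDICT (by name: the statement is the Claim_ definition above) =====
theorem bin_particles_spec : Claim_equal_bin_particles := by
  intro pixels binning _ _
  unfold Spec_bin_particles bin_particles bin_particles_alt
  dsimp only
  apply pvOuter
  intro plist
  have hlen : ((PySem.List.pyRange 0 ((binning.length : Int) - 1) 1).map
      (fun _ => ([] : List (List Int)))).length = (binning.zip (binning.drop 1)).length := by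
    rw [List.length_map, PySem.List.length_pyRange_one, pvPairs_length]
    omega
  rw [pvFold_eq binning plist _ hlen, pvBFold, List.nil_append]
  rw [List.map_const', PySem.List.length_pyRange_one]
  have hlen2 : ((binning.length : Int) - 1 - 0).toNat =
      (pvBBins plist (binning.zip (binning.drop 1))).length := by
    rw [pvBBins_length, pvPairs_length]; omega
  rw [hlen2]
  exact pvZip_nil_left _
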